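-- pv_equiv track=rewrite | github.com/AdvikNarendran/DAA-Lab | lab5prog2.py | maximumPeople
-- ===== SOURCE A (Python) =====
-- def maximumPeople(town_populations, town_locations, cloud_locations, cloud_ranges):
--     max_people = 0
--
--     # Iterate through each cloud
--     for i in range(len(cloud_locations)):
--         current_cloud_location = cloud_locations[i]
--         current_cloud_range = cloud_ranges[i]
--
--         # Calculate the number of people in sunny towns if this cloud is removed
--         sunny_people = 0
--         for j in range(len(town_populations)):
--             town_location = town_locations[j]
--             population = town_populations[j]
--
--             # Check if the town is within the range of the current cloud
--             if town_location < current_cloud_location or town_location >= current_cloud_location + current_cloud_range: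
--                 sunny_people += population
--
--         # Update max_people if necessary
--         max_people = max(max_people, sunny_people)
--
--     return max_people
-- ===== SOURCE B (Python) =====
-- def _bisect_left(a, x, lo, hi):
--     # first index in [lo, hi) whose element is >= x (a sorted ascending)
--     if lo >= hi:
--         return lo
--     mid = (lo + hi) // 2
--     if a[mid] < x:
--         return _bisect_left(a, x, mid + 1, hi)
--     return _bisect_left(a, x, lo, mid)
--
--
-- def maximumPeople(town_populations, town_locations, cloud_locations, cloud_ranges):
--     towns = sorted(zip(town_locations, town_populations), key=lambda t: t[0])
--     locs = [t[0] for t in towns]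
--     prefix = [0]
--     acc = 0
--     for _, p in towns:
--         acc += p
--         prefix.append(acc)
--     total = acc
--     best = 0
--     for c, r in zip(cloud_locations, cloud_ranges):
--         lo = _bisect_left(locs, c, 0, len(locs))
--         hi = _bisect_left(locs, c + r, 0, len(locs))
--         covered = prefix[hi] - prefix[lo] if lo < hi else 0
--         best = max(best, total - covered)
--     return best
-- ===== Notes on version B (the rewrite author's own statement) =====
-- stated objective: faster
-- what changed: Instead of rescanning every town for every cloud, B sorts towns by location once, builds a prefix-sum array of populations, and answers each cloud with two binary searches (covered population = prefix difference), maximizing total - covered.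
import Mathlib
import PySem

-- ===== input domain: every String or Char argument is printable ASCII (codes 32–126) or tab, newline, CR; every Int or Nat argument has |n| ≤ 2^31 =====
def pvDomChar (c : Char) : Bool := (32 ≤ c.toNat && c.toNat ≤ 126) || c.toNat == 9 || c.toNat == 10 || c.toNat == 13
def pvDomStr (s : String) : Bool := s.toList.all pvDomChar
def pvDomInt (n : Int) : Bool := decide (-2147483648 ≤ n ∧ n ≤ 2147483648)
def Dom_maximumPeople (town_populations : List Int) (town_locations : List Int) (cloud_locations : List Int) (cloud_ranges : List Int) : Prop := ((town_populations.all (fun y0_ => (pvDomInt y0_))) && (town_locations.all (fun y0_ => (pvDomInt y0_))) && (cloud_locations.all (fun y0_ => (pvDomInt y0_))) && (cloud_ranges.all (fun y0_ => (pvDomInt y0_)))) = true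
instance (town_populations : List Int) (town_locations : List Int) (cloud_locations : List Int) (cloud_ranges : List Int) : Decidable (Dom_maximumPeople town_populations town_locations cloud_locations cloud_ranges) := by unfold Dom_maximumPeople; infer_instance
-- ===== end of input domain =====

-- B replaces A's rescan of all towns per cloud by sort + prefix sums + two binary searches per cloud (objective: faster).

-- ===== PORT A =====
def maximumPeople (town_populations : List Int) (town_locations : List Int) (cloud_locations : List Int) (cloud_ranges : List Int) : Int :=
  (PySem.List.pyRange 0 (cloud_locations.length : Int) 1).foldl (fun max_people i =>
    let current_cloud_location := PySem.List.pyGetD cloud_locations i 0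
    let current_cloud_range := PySem.List.pyGetD cloud_ranges i 0
    let sunny_people := (PySem.List.pyRange 0 (town_populations.length : Int) 1).foldl (fun s j =>
      let town_location := PySem.List.pyGetD town_locations j 0
      let population := PySem.List.pyGetD town_populations j 0
      if town_location < current_cloud_location ∨ town_location ≥ current_cloud_location + current_cloud_range then
        s + population
      else s) 0
    max max_people sunny_people) 0

-- ===== PORT B =====
-- port of Source B's hand-written _bisect_left(a, x, lo, hi)
def pvBisect (a : List Int) (x : Int) (lo hi : Nat) : Nat :=
  if lo ≥ hi then lo
  else
    let mid := (lo + hi) / 2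
    if PySem.List.pyGetD a (mid : Int) 0 < x then pvBisect a x (mid + 1) hi
    else pvBisect a x lo mid
termination_by hi - lo
decreasing_by all_goals omega

def maximumPeople_alt (town_populations : List Int) (town_locations : List Int) (cloud_locations : List Int) (cloud_ranges : List Int) : Int :=
  let towns := PySem.List.sorted (town_locations.zip town_populations) Prod.fst
  let locs := towns.map (fun t => t.1)
  let st := towns.foldl (fun (st : List Int × Int) t => (st.1 ++ [st.2 + t.2], st.2 + t.2)) ([0], 0)
  let pre := st.1
  let total := st.2
  (cloud_locations.zip cloud_ranges).foldl (fun best cr =>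
    let lo := pvBisect locs cr.1 0 locs.length
    let hi := pvBisect locs (cr.1 + cr.2) 0 locs.length
    let covered := if lo < hi then PySem.List.pyGetD pre (hi : Int) 0 - PySem.List.pyGetD pre (lo : Int) 0 else 0
    max best (total - covered)) 0

-- ===== PRECONDITION & SPEC =====
-- Pre_ excludes exactly the inputs on which A raises IndexError: a cloud index beyond cloud_ranges,
-- or (when at least one cloud exists) a town index beyond town_locations.
def Pre_maximumPeople (town_populations : List Int) (town_locations : List Int) (cloud_locations : List Int) (cloud_ranges : List Int) : Prop :=
  cloud_locations.length ≤ cloud_ranges.length ∧ (cloud_locations = [] ∨ town_populations.length ≤ town_locations.length)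
instance (town_populations : List Int) (town_locations : List Int) (cloud_locations : List Int) (cloud_ranges : List Int) : Decidable (Pre_maximumPeople town_populations town_locations cloud_locations cloud_ranges) := by unfold Pre_maximumPeople; infer_instance
def pvWitness_maximumPeople : List Int × List Int × List Int × List Int := ([3, 4], [1, 2], [1], [1])
def Spec_maximumPeople (town_populations : List Int) (town_locations : List Int) (cloud_locations : List Int) (cloud_ranges : List Int) (out : Int) : Prop := out = maximumPeople_alt town_populations town_locations cloud_locations cloud_ranges
instance (town_populations : List Int) (town_locations : List Int) (cloud_locations : List Int) (cloud_ranges : List Int) (out : Int) : Decidable (Spec_maximumPeople town_populations town_locations cloud_locations cloud_ranges out) := by unfold Spec_maximumPeople; infer_instance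

-- ===== CLAIM (what is proved, stated in full; the proofs are below) =====
def Claim_equal_maximumPeople : Prop := ∀ (town_populations : List Int) (town_locations : List Int) (cloud_locations : List Int) (cloud_ranges : List Int), Dom_maximumPeople town_populations town_locations cloud_locations cloud_ranges → Pre_maximumPeople town_populations town_locations cloud_locations cloud_ranges → Spec_maximumPeople town_populations town_locations cloud_locations cloud_ranges (maximumPeople town_populations town_locations cloud_locations cloud_ranges)

-- ===== LEMMAS AND PROOFS =====

-- sum of the populations (second components) of a list of (location, population) pairs
def sumF (l : List (Int × Int)) : Int := (l.map Prod.snd).sum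

-- indexing by range over two parallel lists is zipping them
lemma range_pyGetD_eq_zip (xs ys : List Int) (h : xs.length ≤ ys.length) :
    (PySem.List.pyRange 0 (xs.length : Int) 1).map
      (fun j => (PySem.List.pyGetD xs j 0, PySem.List.pyGetD ys j 0)) = xs.zip ys := by
  rw [PySem.List.pyRange_zero_nat, List.map_map]
  apply List.ext_getElem
  · simp [h]
  · intro i h1 h2
    simp only [List.getElem_map, List.getElem_range, Function.comp_apply, List.getElem_zip]
    simp only [List.length_map, List.length_range] at h1
    rw [PySem.List.pyGetD_natCast, PySem.List.pyGetD_natCast,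
        List.getD_eq_getElem xs 0 h1, List.getD_eq_getElem ys 0 (by omega)]

-- same, with the range driven by the second list's length
lemma range_pyGetD_eq_zip' (xs ys : List Int) (h : ys.length ≤ xs.length) :
    (PySem.List.pyRange 0 (ys.length : Int) 1).map
      (fun j => (PySem.List.pyGetD xs j 0, PySem.List.pyGetD ys j 0)) = xs.zip ys := by
  rw [PySem.List.pyRange_zero_nat, List.map_map]
  apply List.ext_getElem
  · simp [h]
  · intro i h1 h2
    simp only [List.getElem_map, List.getElem_range, Function.comp_apply, List.getElem_zip]
    simp only [List.length_map, List.length_range] at h1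
    rw [PySem.List.pyGetD_natCast, PySem.List.pyGetD_natCast,
        List.getD_eq_getElem xs 0 (by omega), List.getD_eq_getElem ys 0 h1]

-- a conditional-accumulate loop is the sum of a filtered projection
lemma foldl_if_sum (l : List (Int × Int)) (p : Int × Int → Prop) [DecidablePred p] (init : Int) :
    l.foldl (fun s t => if p t then s + t.2 else s) init
      = init + sumF (l.filter (fun t => decide (p t))) := by
  induction l generalizing init with
  | nil => simp [sumF]
  | cons a t ih =>
    simp only [List.foldl_cons, List.filter_cons]
    by_cases hp : p a
    · simp [hp, ih, sumF, add_assoc]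
    · simp [hp, ih]

lemma sumF_perm {l l' : List (Int × Int)} (h : l.Perm l') : sumF l = sumF l' := by
  exact List.Perm.sum_eq (h.map Prod.snd)

lemma sorted_getElem_mono (a : List Int) (h : a.Pairwise (· ≤ ·)) (i j : Nat) (hij : i ≤ j) (hj : j < a.length) : a[i]'(by omega) ≤ a[j] := by
  rcases Nat.lt_or_eq_of_le hij with hlt | heq
  · exact List.pairwise_iff_getElem.mp h i j (by omega) hj hlt
  · subst heq; exact le_refl _

lemma mem_seg {a : List Int} {s k : Nat} {y : Int} (hy : y ∈ (a.drop s).take k) :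
    ∃ i, i < k ∧ ∃ h : s + i < a.length, y = a[s + i] := by
  rw [List.mem_iff_getElem] at hy
  obtain ⟨i, hi, hyi⟩ := hy
  simp only [List.length_take, List.length_drop, lt_min_iff] at hi
  refine ⟨i, hi.1, by omega, ?_⟩
  rw [← hyi, List.getElem_take, List.getElem_drop]

lemma seg_split (a : List Int) (lo m hi : Nat) (h1 : lo ≤ m) (h2 : m ≤ hi) :
    (a.drop lo).take (hi - lo) = (a.drop lo).take (m - lo) ++ ((a.drop m).take (hi - m)) := by
  have he : hi - lo = (m - lo) + (hi - m) := by omega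
  rw [he, List.take_add, List.drop_drop]
  have he2 : lo + (m - lo) = m := by omega
  rw [he2]

-- the hand-written binary search counts the elements smaller than x (on a sorted list)
lemma pvBisect_countP (n : Nat) : ∀ (a : List Int) (x : Int) (lo hi : Nat),
    hi - lo ≤ n → a.Pairwise (· ≤ ·) → hi ≤ a.length → lo ≤ hi →
    pvBisect a x lo hi = lo + ((a.drop lo).take (hi - lo)).countP (fun y => decide (y < x)) := by
  induction n with
  | zero =>
    intro a x lo hi h1 hs hlen hlh
    have hle : lo = hi := by omega
    subst hle
    rw [pvBisect]
    simp
  | succ n ih =>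
    intro a x lo hi h1 hs hlen hlh
    rw [pvBisect]
    by_cases hge : lo ≥ hi
    · have h0 : hi - lo = 0 := by omega
      rw [if_pos hge, h0]
      simp
    · rw [if_neg hge]
      show (if PySem.List.pyGetD a (((lo + hi) / 2 : Nat) : Int) 0 < x then
              pvBisect a x ((lo + hi) / 2 + 1) hi else pvBisect a x lo ((lo + hi) / 2)) = _
      set m := (lo + hi) / 2 with hm
      have hlom : lo ≤ m := by omega
      have hmhi : m < hi := by omega
      have hmlen : m < a.length := by omega
      have hget : PySem.List.pyGetD a ((m : Nat) : Int) 0 = a[m] := by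
        rw [PySem.List.pyGetD_natCast, List.getD_eq_getElem a 0 hmlen]
      rw [hget]
      by_cases hx : a[m] < x
      · rw [if_pos hx, ih a x (m + 1) hi (by omega) hs hlen (by omega)]
        have hsplit := seg_split a lo (m + 1) hi (by omega) (by omega)
        rw [hsplit, List.countP_append]
        have hcnt : ((a.drop lo).take (m + 1 - lo)).countP (fun y => decide (y < x)) = m + 1 - lo := by
          have hlength : ((a.drop lo).take (m + 1 - lo)).length = m + 1 - lo := by
            simp only [List.length_take, List.length_drop]
            omega
          have hall : ∀ y ∈ (a.drop lo).take (m + 1 - lo), (fun y => decide (y < x)) y = true := by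
            intro y hy
            obtain ⟨i, hik, hilen, hyi⟩ := mem_seg hy
            have hle2 : a[lo + i]'hilen ≤ a[m] := sorted_getElem_mono a hs (lo + i) m (by omega) hmlen
            subst hyi
            simp only [decide_eq_true_eq]
            omega
          rw [List.countP_eq_length.mpr hall, hlength]
        rw [hcnt]
        omega
      · rw [if_neg hx, ih a x lo m (by omega) hs (by omega) (by omega)]
        have hsplit := seg_split a lo m hi (by omega) (by omega)
        rw [hsplit, List.countP_append]
        have hcnt : ((a.drop m).take (hi - m)).countP (fun y => decide (y < x)) = 0 := by
          rw [List.countP_eq_zero]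
          intro y hy
          obtain ⟨i, hik, hilen, hyi⟩ := mem_seg hy
          have hle2 : a[m] ≤ a[m + i]'hilen := sorted_getElem_mono a hs m (m + i) (by omega) hilen
          subst hyi
          simp only [decide_eq_true_eq]
          omega
        rw [hcnt]
        omega

lemma pvBisect_full (a : List Int) (x : Int) (h : a.Pairwise (· ≤ ·)) :
    pvBisect a x 0 a.length = a.countP (fun y => decide (y < x)) := by
  rw [pvBisect_countP a.length a x 0 a.length (by omega) h (le_refl _) (by omega)]
  simp

-- the prefix-sum fold, in closed form
lemma prefix_foldl : ∀ (l : List (Int × Int)) (p0 : List Int) (a0 : Int),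
    l.foldl (fun (st : List Int × Int) t => (st.1 ++ [st.2 + t.2], st.2 + t.2)) (p0, a0)
      = (p0 ++ (List.range l.length).map (fun k => a0 + ((l.map Prod.snd).take (k + 1)).sum),
         a0 + (l.map Prod.snd).sum) := by
  intro l
  induction l with
  | nil => simp
  | cons a t ih =>
    intro p0 a0
    simp only [List.foldl_cons]
    rw [ih]
    simp only [List.length_cons, List.map_cons, List.range_succ_eq_map, List.map_map,
      List.take_succ_cons, List.sum_cons, List.map_cons]
    rw [Prod.mk.injEq]
    constructor
    · rw [List.append_assoc]
      congr 1
      simp only [List.cons_append, List.nil_append]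
      congr 1
      · simp
      · apply List.map_congr_left
        intro k _
        simp only [Function.comp_apply]
        ring
    · ring

lemma pre_getD (l : List (Int × Int)) (j : Nat) (hj : j ≤ l.length) :
    PySem.List.pyGetD ((l.foldl (fun (st : List Int × Int) t => (st.1 ++ [st.2 + t.2], st.2 + t.2)) ([0], 0)).1) (j : Int) 0
      = ((l.map Prod.snd).take j).sum := by
  rw [prefix_foldl]
  simp only [PySem.List.pyGetD_natCast, List.singleton_append]
  cases j with
  | zero => simp
  | succ k =>
    have hk : k < l.length := by omega
    rw [List.getD_cons_succ, List.getD_eq_getElem _ 0 (by simpa using hk)]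
    simp

-- on a list sorted by location, taking the first countP(loc < x) elements is filtering by loc < x
lemma take_countP_filter : ∀ (l : List (Int × Int)) (x : Int), l.Pairwise (fun a b => a.1 ≤ b.1) →
    l.take (l.countP (fun t => decide (t.1 < x))) = l.filter (fun t => decide (t.1 < x)) := by
  intro l x hl
  induction l with
  | nil => simp
  | cons a t ih =>
    rw [List.pairwise_cons] at hl
    by_cases ha : a.1 < x
    · simp only [List.countP_cons, List.filter_cons, ha, decide_true, if_pos, List.take_succ_cons]
      rw [ih hl.2]
    · have h0 : t.countP (fun t => decide (t.1 < x)) = 0 := by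
        rw [List.countP_eq_zero]
        intro b hb
        have := hl.1 b hb
        simp only [decide_eq_true_eq]
        omega
      have hf : t.filter (fun t => decide (t.1 < x)) = [] := by
        rw [List.filter_eq_nil_iff]
        intro b hb
        have := hl.1 b hb
        simp only [decide_eq_true_eq]
        omega
      simp [ha, h0, hf]

lemma sumF_filter_partition (l : List (Int × Int)) (p q : Int × Int → Bool) :
    sumF (l.filter fun t => p t && q t) + sumF (l.filter fun t => p t && !q t) = sumF (l.filter p) := by
  induction l with
  | nil => simp [sumF]
  | cons a t ih =>
    simp only [List.filter_cons]
    cases hp : p a <;> cases hq : q a <;>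
      simp only [Bool.true_and, Bool.false_and, Bool.not_true, Bool.not_false] <;>
      simp [sumF] at ih ⊢ <;> omega

-- the per-cloud value B computes equals the sunny-population sum A computes
lemma cloud_eq (zl : List (Int × Int)) (c r : Int) :
    sumF (zl.filter (fun t => decide (t.1 < c ∨ t.1 ≥ c + r)))
      = (let towns := PySem.List.sorted zl Prod.fst
         let locs := towns.map (fun t => t.1)
         let st := towns.foldl (fun (st : List Int × Int) t => (st.1 ++ [st.2 + t.2], st.2 + t.2)) ([0], 0)
         let lo := pvBisect locs c 0 locs.length
         let hi := pvBisect locs (c + r) 0 locs.length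
         st.2 - (if lo < hi then PySem.List.pyGetD st.1 (hi : Int) 0 - PySem.List.pyGetD st.1 (lo : Int) 0 else 0)) := by
  dsimp only []
  have hTperm : (PySem.List.sorted zl Prod.fst).Perm zl := PySem.List.sorted_perm zl Prod.fst false
  have hTpair : (PySem.List.sorted zl Prod.fst).Pairwise (fun a b => a.1 ≤ b.1) :=
    PySem.List.sorted_pairwise zl Prod.fst
  have hLpair : ((PySem.List.sorted zl Prod.fst).map (fun t => t.1)).Pairwise (· ≤ ·) :=
    List.pairwise_map.mpr hTpair
  have hlo : pvBisect ((PySem.List.sorted zl Prod.fst).map (fun t => t.1)) c 0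
        ((PySem.List.sorted zl Prod.fst).map (fun t => t.1)).length
      = (PySem.List.sorted zl Prod.fst).countP (fun t => decide (t.1 < c)) := by
    rw [pvBisect_full _ c hLpair, List.countP_map]
    rfl
  have hhi : pvBisect ((PySem.List.sorted zl Prod.fst).map (fun t => t.1)) (c + r) 0
        ((PySem.List.sorted zl Prod.fst).map (fun t => t.1)).length
      = (PySem.List.sorted zl Prod.fst).countP (fun t => decide (t.1 < c + r)) := by
    rw [pvBisect_full _ (c + r) hLpair, List.countP_map]
    rfl
  rw [hlo, hhi,
      pre_getD (PySem.List.sorted zl Prod.fst) _ List.countP_le_length,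
      pre_getD (PySem.List.sorted zl Prod.fst) _ List.countP_le_length,
      prefix_foldl]
  dsimp only []
  rw [← List.map_take, ← List.map_take,
      take_countP_filter (PySem.List.sorted zl Prod.fst) c hTpair,
      take_countP_filter (PySem.List.sorted zl Prod.fst) (c + r) hTpair]
  have hperm : sumF (zl.filter (fun t => decide (t.1 < c ∨ t.1 ≥ c + r)))
      = sumF ((PySem.List.sorted zl Prod.fst).filter (fun t => decide (t.1 < c ∨ t.1 ≥ c + r))) :=
    (sumF_perm (hTperm.filter _)).symm
  rw [hperm]
  by_cases hr : c < c + r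
  · have E1 := sumF_filter_partition (PySem.List.sorted zl Prod.fst)
      (fun _ => true) (fun t => decide (c ≤ t.1) && decide (t.1 < c + r))
    have E2 := sumF_filter_partition (PySem.List.sorted zl Prod.fst)
      (fun t => decide (t.1 < c + r)) (fun t => decide (t.1 < c))
    simp only [Bool.true_and] at E1
    have hq1 : (PySem.List.sorted zl Prod.fst).filter
          (fun t => !(decide (c ≤ t.1) && decide (t.1 < c + r)))
        = (PySem.List.sorted zl Prod.fst).filter (fun t => decide (t.1 < c ∨ t.1 ≥ c + r)) := by
      apply List.filter_congr
      intro t _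
      rw [Bool.eq_iff_iff]
      simp only [Bool.not_eq_true', Bool.and_eq_false_iff, decide_eq_false_iff_not,
        decide_eq_true_eq, ge_iff_le]
      omega
    have hq2 : (PySem.List.sorted zl Prod.fst).filter
          (fun t => decide (t.1 < c + r) && decide (t.1 < c))
        = (PySem.List.sorted zl Prod.fst).filter (fun t => decide (t.1 < c)) := by
      apply List.filter_congr
      intro t _
      rw [Bool.eq_iff_iff]
      simp only [Bool.and_eq_true, decide_eq_true_eq]
      omega
    have hq3 : (PySem.List.sorted zl Prod.fst).filter
          (fun t => decide (t.1 < c + r) && !decide (t.1 < c))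
        = (PySem.List.sorted zl Prod.fst).filter (fun t => decide (c ≤ t.1) && decide (t.1 < c + r)) := by
      apply List.filter_congr
      intro t _
      rw [Bool.eq_iff_iff]
      simp only [Bool.and_eq_true, Bool.not_eq_true', decide_eq_true_eq, decide_eq_false_iff_not]
      omega
    have hfil : (PySem.List.sorted zl Prod.fst).filter (fun _ => true)
        = PySem.List.sorted zl Prod.fst := List.filter_eq_self.mpr (fun _ _ => rfl)
    rw [hq1, hfil] at E1
    rw [hq2, hq3] at E2
    by_cases hlt : (PySem.List.sorted zl Prod.fst).countP (fun t => decide (t.1 < c))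
        < (PySem.List.sorted zl Prod.fst).countP (fun t => decide (t.1 < c + r))
    · rw [if_pos hlt]
      simp only [sumF] at E1 E2 ⊢
      omega
    · rw [if_neg hlt]
      have hmono : (PySem.List.sorted zl Prod.fst).countP (fun t => decide (t.1 < c))
          ≤ (PySem.List.sorted zl Prod.fst).countP (fun t => decide (t.1 < c + r)) := by
        apply List.countP_mono_left
        intro t _ h
        simp only [decide_eq_true_eq] at h ⊢
        omega
      have hceq : (PySem.List.sorted zl Prod.fst).filter (fun t => decide (t.1 < c))
          = (PySem.List.sorted zl Prod.fst).filter (fun t => decide (t.1 < c + r)) := by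
        rw [← take_countP_filter (PySem.List.sorted zl Prod.fst) c hTpair,
            ← take_countP_filter (PySem.List.sorted zl Prod.fst) (c + r) hTpair]
        have hce : (PySem.List.sorted zl Prod.fst).countP (fun t => decide (t.1 < c))
            = (PySem.List.sorted zl Prod.fst).countP (fun t => decide (t.1 < c + r)) := by omega
        rw [hce]
      have hsc : sumF ((PySem.List.sorted zl Prod.fst).filter (fun t => decide (t.1 < c)))
          = sumF ((PySem.List.sorted zl Prod.fst).filter (fun t => decide (t.1 < c + r))) := by
        rw [hceq]
      simp only [sumF] at E1 E2 hsc ⊢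
      omega
  · -- empty interval: the cloud covers nobody, A's condition holds for every town
    have hmono : (PySem.List.sorted zl Prod.fst).countP (fun t => decide (t.1 < c + r))
        ≤ (PySem.List.sorted zl Prod.fst).countP (fun t => decide (t.1 < c)) := by
      apply List.countP_mono_left
      intro t _ h
      simp only [decide_eq_true_eq] at h ⊢
      omega
    rw [if_neg (by omega)]
    have hfil : (PySem.List.sorted zl Prod.fst).filter (fun t => decide (t.1 < c ∨ t.1 ≥ c + r))
        = PySem.List.sorted zl Prod.fst := by
      rw [List.filter_eq_self]
      intro t _
      simp only [decide_eq_true_eq]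
      omega
    rw [hfil]
    simp [sumF]

-- A's inner loop over the towns, as a function of one cloud (proof-side name for A's own code)
def innerA (pops locs : List Int) (c r : Int) : Int :=
  (PySem.List.pyRange 0 (pops.length : Int) 1).foldl (fun s j =>
    if PySem.List.pyGetD locs j 0 < c ∨ PySem.List.pyGetD locs j 0 ≥ c + r then
      s + PySem.List.pyGetD pops j 0
    else s) 0

-- ===== VERDICT (by name: the statement is the Claim_ definition above) =====
theorem maximumPeople_spec : Claim_equal_maximumPeople := by
  intro pops locs clocs crs _ hpre
  obtain ⟨hc, hp⟩ := hpre
  unfold Spec_maximumPeople maximumPeople maximumPeople_alt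
  rcases hp with hnil | hplen
  · subst hnil
    simp [PySem.List.pyRange_zero_nat]
  · have hinner : ∀ c r : Int, innerA pops locs c r
        = sumF ((locs.zip pops).filter (fun t => decide (t.1 < c ∨ t.1 ≥ c + r))) := by
      intro c r
      calc innerA pops locs c r
          = ((PySem.List.pyRange 0 (pops.length : Int) 1).map
              (fun j => (PySem.List.pyGetD locs j 0, PySem.List.pyGetD pops j 0))).foldl
              (fun s t => if t.1 < c ∨ t.1 ≥ c + r then s + t.2 else s) 0 := by
            rw [List.foldl_map]
            rfl
        _ = (locs.zip pops).foldl
              (fun s t => if t.1 < c ∨ t.1 ≥ c + r then s + t.2 else s) 0 := by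
              rw [range_pyGetD_eq_zip' locs pops hplen]
        _ = 0 + sumF ((locs.zip pops).filter (fun t => decide (t.1 < c ∨ t.1 ≥ c + r))) :=
              foldl_if_sum _ _ 0
        _ = sumF ((locs.zip pops).filter (fun t => decide (t.1 < c ∨ t.1 ≥ c + r))) := zero_add _
    have hcloud : ∀ t : Int × Int, innerA pops locs t.1 t.2
        = (let towns := PySem.List.sorted (locs.zip pops) Prod.fst
           let tlocs := towns.map (fun u => u.1)
           let st := towns.foldl (fun (st : List Int × Int) u => (st.1 ++ [st.2 + u.2], st.2 + u.2)) ([0], 0)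
           let lo := pvBisect tlocs t.1 0 tlocs.length
           let hi := pvBisect tlocs (t.1 + t.2) 0 tlocs.length
           st.2 - (if lo < hi then PySem.List.pyGetD st.1 (hi : Int) 0 - PySem.List.pyGetD st.1 (lo : Int) 0 else 0)) :=
      fun t => (hinner t.1 t.2).trans (cloud_eq (locs.zip pops) t.1 t.2)
    calc (PySem.List.pyRange 0 (clocs.length : Int) 1).foldl
            (fun acc i => max acc (innerA pops locs (PySem.List.pyGetD clocs i 0) (PySem.List.pyGetD crs i 0))) 0
          = ((PySem.List.pyRange 0 (clocs.length : Int) 1).map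
              (fun i => (PySem.List.pyGetD clocs i 0, PySem.List.pyGetD crs i 0))).foldl
              (fun acc t => max acc (innerA pops locs t.1 t.2)) 0 := by
            rw [List.foldl_map]
      _ = (clocs.zip crs).foldl (fun acc t => max acc (innerA pops locs t.1 t.2)) 0 := by
            rw [range_pyGetD_eq_zip clocs crs hc]
      _ = _ := by
            have hfun : (fun (acc : Int) (t : Int × Int) => max acc (innerA pops locs t.1 t.2))
                = (fun (acc : Int) (t : Int × Int) => max acc
                    (let towns := PySem.List.sorted (locs.zip pops) Prod.fst
                     let tlocs := towns.map (fun u => u.1)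
                     let st := towns.foldl (fun (st : List Int × Int) u => (st.1 ++ [st.2 + u.2], st.2 + u.2)) ([0], 0)
                     let lo := pvBisect tlocs t.1 0 tlocs.length
                     let hi := pvBisect tlocs (t.1 + t.2) 0 tlocs.length
                     st.2 - (if lo < hi then PySem.List.pyGetD st.1 (hi : Int) 0 - PySem.List.pyGetD st.1 (lo : Int) 0 else 0))) := by
              funext acc t
              rw [hcloud t]
            rw [hfun]
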